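-- pv_equiv track=rewrite | github.com/tkdalsss/CTS | BinarySearch/PresentableTree.py | solution
-- ===== SOURCE A (Python) =====
-- def possible(number):
--     length = len(number)
--
--     if length == 1 or '1' not in number or '0' not in number:
--         return True
--
--     mid = length // 2
--     if number[mid] == '0':
--         # 이진 트리를 만들 수 없으므로 False return
--         return False
--
--     return possible(number[:mid]) and possible(number[mid+1:])
--
-- def solution(numbers):
--     # 2진수로 변환하면 0bxxx의 형태로 나오기 때문에 '0b'를 제거하고 리스트에 저장
--     bin_numbers = [bin(number)[2:] for number in numbers]
--     bin_list = [2**x - 1 for x in range(50)]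
--     answer = []
--
--     for number in bin_numbers:
--         length = len(number)
--         for bin_num in bin_list:
--             if bin_num >= length:
--                 number = '0'*(bin_num-length) + number
--                 break
--         answer.append(1 if possible(number) else 0)
--
--     return answer
-- ===== SOURCE B (Python) =====
-- def solution(numbers):
--     answer = []
--     for n in numbers:
--         s = bin(n)[2:]
--         size = 1
--         while size < len(s):
--             size = 2 * size + 1
--         s = '0' * (size - len(s)) + s
--
--         # chk(lo, hi) -> (has_one, bad) for the subtree on s[lo:hi], computed in
--         # one index-based pass with no slicing and no substring rescans:
--         # bad iff some internal '0' node has a '1' somewhere in its subtree.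
--         def chk(lo, hi):
--             if hi - lo <= 1:
--                 return (s[lo] == '1', False)
--             mid = (lo + hi) // 2
--             h1l, bl = chk(lo, mid)
--             h1r, br = chk(mid + 1, hi)
--             c = s[mid]
--             return (h1l or h1r or c == '1',
--                     bl or br or (c == '0' and (h1l or h1r)))
--
--         answer.append(0 if chk(0, len(s))[1] else 1)
--     return answer
-- ===== Notes on version B (the rewrite author's own statement) =====
-- stated objective: alternative
-- what changed: A tests each subtree recursively on string slices, rescanning every substring for '1'/'0' membership at each level; B makes one index-based recursive pass that returns a (has-a-'1', invalid) pair per subtree, so no slices are built and no substring is rescanned.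
import Mathlib
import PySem

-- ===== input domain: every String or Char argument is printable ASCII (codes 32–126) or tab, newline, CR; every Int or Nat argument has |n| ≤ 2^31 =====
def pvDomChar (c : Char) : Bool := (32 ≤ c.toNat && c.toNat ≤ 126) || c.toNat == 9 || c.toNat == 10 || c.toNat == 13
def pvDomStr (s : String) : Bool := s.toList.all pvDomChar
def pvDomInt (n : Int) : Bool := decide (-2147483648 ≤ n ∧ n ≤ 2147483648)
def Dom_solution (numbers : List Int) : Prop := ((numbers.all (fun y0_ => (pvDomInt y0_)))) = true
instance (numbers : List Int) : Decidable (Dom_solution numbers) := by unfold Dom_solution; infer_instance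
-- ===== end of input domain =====

-- B replaces A's per-number recursion on string slices (each level re-scanning the substring
-- for '1'/'0') by one index-based pass computing (has-a-'1', invalid) per subtree; same values.

-- ===== PORT A =====

-- shared exact helper for Python's bin(n)[2:]: binary digits of |n| (MSB first),
-- prefixed by 'b' when n < 0 (bin(-5) = '-0b101', so [2:] keeps the 'b').
def pvBinDigits : Nat → List Char
  | 0 => []
  | (n+1) => (if (n+1) % 2 = 1 then '1' else '0') :: pvBinDigits ((n+1)/2)
decreasing_by exact Nat.div_lt_self (Nat.succ_pos n) (by norm_num)

def pyBin2 (n : Int) : List Char :=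
  if n < 0 then 'b' :: (pvBinDigits n.natAbs).reverse
  else if n = 0 then ['0'] else (pvBinDigits n.natAbs).reverse

-- number[mid] is ported as number[mid]?; the guard branch guarantees mid is in range,
-- so Python raises nowhere here.
def possibleA (number : List Char) : Bool :=
  if _h : number.length = 1 ∨ number.contains '1' = false ∨ number.contains '0' = false then
    true
  else
    let mid := number.length / 2
    if number[mid]? = some '0' then false
    else possibleA (number.take mid) && possibleA (number.drop (mid+1))
termination_by number.length
decreasing_by
  · have hne : number ≠ [] := by
      intro hnil; subst hnil; simp at _h
    have hpos : 0 < number.length := List.length_pos_of_ne_nil hne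
    simp [List.length_take]; omega
  · have hne : number ≠ [] := by
      intro hnil; subst hnil; simp at _h
    have hpos : 0 < number.length := List.length_pos_of_ne_nil hne
    simp [List.length_drop]; omega

-- '0'*(bin_num-length) is replicate of the difference (Python yields '' when it is ≤ 0,
-- exactly as Int.toNat clamps); the for/break search is the first match, List.find?.
def solution (numbers : List Int) : List Int :=
  let bin_numbers := numbers.map (fun number => pyBin2 number)
  let bin_list := (PySem.List.pyRange 0 50 1).map (fun x => (2:Int) ^ x.toNat - 1)
  bin_numbers.foldl
    (fun answer number =>
      let length := number.length
      let number :=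
        match bin_list.find? (fun bin_num => (length : Int) ≤ bin_num) with
        | some bin_num => List.replicate (bin_num - (length : Int)).toNat '0' ++ number
        | none => number
      answer ++ [if possibleA number then (1:Int) else 0])
    []

-- ===== PORT B =====

-- the while loop 'while size < len(s): size = 2*size+1'
def padSize (n sz : Nat) : Nat :=
  if _h : sz < n then padSize n (2 * sz + 1) else sz
termination_by n - sz

-- chk(lo, hi) from Source B: (has-one, bad) on segment [lo,hi); s[lo]/s[mid] ported as _[_]?
-- (on every call Python makes the index is in range)
def chkB (s : List Char) (lo hi : Nat) : Bool × Bool :=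
  if _h : hi - lo ≤ 1 then (s[lo]? == some '1', false)
  else
    let mid := (lo + hi) / 2
    let l := chkB s lo mid
    let r := chkB s (mid + 1) hi
    let c := s[mid]?
    (l.1 || r.1 || c == some '1', l.2 || r.2 || (c == some '0' && (l.1 || r.1)))
termination_by hi - lo
decreasing_by all_goals omega

def solution_alt (numbers : List Int) : List Int :=
  numbers.foldl
    (fun answer n =>
      let s0 := pyBin2 n
      let size := padSize s0.length 1
      let s := List.replicate (size - s0.length) '0' ++ s0
      answer ++ [if (chkB s 0 s.length).2 then (0:Int) else 1])
    []

-- ===== PRECONDITION & SPEC =====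
def Spec_solution (numbers : List Int) (out : List Int) : Prop := out = solution_alt numbers
instance (numbers : List Int) (out : List Int) : Decidable (Spec_solution numbers out) := by unfold Spec_solution; infer_instance

-- ===== CLAIM (what is proved, stated in full; the proofs are below) =====
def Claim_equal_solution : Prop := ∀ (numbers : List Int), Dom_solution numbers → Spec_solution numbers (solution numbers)

-- ===== LEMMAS AND PROOFS =====

-- the per-element bodies of the two folds (proof-side names for the lambdas in the ports)
def elemA (number : List Char) : Int :=
  let length := number.length
  let number :=
    match ((PySem.List.pyRange 0 50 1).map (fun x => (2:Int) ^ x.toNat - 1)).find?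
        (fun bin_num => (length : Int) ≤ bin_num) with
    | some bin_num => List.replicate (bin_num - (length : Int)).toNat '0' ++ number
    | none => number
  if possibleA number then (1:Int) else 0

def elemB (n : Int) : Int :=
  let s0 := pyBin2 n
  let size := padSize s0.length 1
  let s := List.replicate (size - s0.length) '0' ++ s0
  if (chkB s 0 s.length).2 then (0:Int) else 1

theorem foldl_snoc {α : Type} (f : α → Int) (g : List Int → α → List Int)
    (hg : ∀ a x, g a x = a ++ [f x]) :
    ∀ (l : List α) (acc : List Int), l.foldl g acc = acc ++ l.map f := by
  intro l
  induction l with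
  | nil => intro acc; simp
  | cons x xs ih => intro acc; simp [List.foldl_cons, hg, ih]

theorem pvBinDigits_len_le : ∀ (k m : Nat), m < 2 ^ k → (pvBinDigits m).length ≤ k := by
  intro k
  induction k with
  | zero => intro m hm; interval_cases m; simp [pvBinDigits]
  | succ k ih =>
    intro m hm
    match m with
    | 0 => simp [pvBinDigits]
    | (n+1) =>
      rw [pvBinDigits]
      simp only [List.length_cons]
      have h2 : (n+1)/2 < 2 ^ k := by
        have : 2 ^ (k+1) = 2 * 2 ^ k := by ring
        omega
      have := ih ((n+1)/2) h2
      omega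

theorem pyBin2_len (n : Int) (h1 : -2147483648 ≤ n) (h2 : n ≤ 2147483648) :
    1 ≤ (pyBin2 n).length ∧ (pyBin2 n).length ≤ 33 := by
  have habs : n.natAbs < 2 ^ 32 := by
    omega
  have hlen := pvBinDigits_len_le 32 n.natAbs habs
  unfold pyBin2
  split_ifs with hneg hzero
  · simp; omega
  · simp
  · have hpos : 0 < n.natAbs := by omega
    obtain ⟨m, hm⟩ : ∃ m, n.natAbs = m + 1 := ⟨n.natAbs - 1, by omega⟩
    rw [hm, pvBinDigits]
    simp only [List.length_reverse, List.length_cons]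
    rw [hm, pvBinDigits] at hlen
    simp at hlen
    constructor <;> omega

theorem padSize_step (n sz : Nat) (h : sz < n) : padSize n sz = padSize n (2 * sz + 1) := by
  rw [padSize]; simp [h]
theorem padSize_stop (n sz : Nat) (h : ¬ sz < n) : padSize n sz = sz := by
  rw [padSize]; simp [h]

theorem padSize_fuel : ∀ (k n sz : Nat), n - sz ≤ k →
    n ≤ padSize n sz ∧ (∀ j, 1 ≤ j → sz = 2 ^ j - 1 → ∃ j', 1 ≤ j' ∧ padSize n sz = 2 ^ j' - 1) := by
  intro k
  induction k with
  | zero =>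
    intro n sz h
    have h2 : ¬ sz < n := by omega
    rw [padSize_stop n sz h2]
    exact ⟨by omega, fun j hj hsz => ⟨j, hj, hsz⟩⟩
  | succ k ih =>
    intro n sz h
    by_cases h2 : sz < n
    · rw [padSize_step n sz h2]
      obtain ⟨hge, hpow⟩ := ih n (2 * sz + 1) (by omega)
      refine ⟨hge, fun j hj hsz => hpow (j+1) (by omega) ?_⟩
      have e1 : 2 ^ (j+1) = 2 * 2 ^ j := by ring
      have e2 : 1 ≤ 2 ^ j := Nat.one_le_two_pow
      omega
    · rw [padSize_stop n sz h2]
      exact ⟨by omega, fun j hj hsz => ⟨j, hj, hsz⟩⟩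

theorem padSize_form (L : Nat) :
    ∃ j, 1 ≤ j ∧ padSize L 1 = 2 ^ j - 1 ∧ L ≤ padSize L 1 := by
  obtain ⟨hge, hpow⟩ := padSize_fuel L L 1 (by omega)
  obtain ⟨j, hj, hp⟩ := hpow 1 (by norm_num) (by norm_num)
  exact ⟨j, hj, hp, hge⟩

theorem find_eq_padSize (L : Nat) (h1 : 1 ≤ L) (h2 : L ≤ 33) :
    ((PySem.List.pyRange 0 50 1).map (fun x => (2:Int) ^ x.toNat - 1)).find?
        (fun bin_num => decide ((L : Int) ≤ bin_num)) = some ((padSize L 1 : Nat) : Int) := by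
  interval_cases L <;> (simp [padSize_step, padSize_stop]; decide)

theorem possibleA_of_no1 (t : List Char) (h : t.contains '1' = false) : possibleA t = true := by
  rw [possibleA, dif_pos (Or.inr (Or.inl h))]

theorem possibleA_of_no0 (t : List Char) (h : t.contains '0' = false) : possibleA t = true := by
  rw [possibleA, dif_pos (Or.inr (Or.inr h))]

theorem char_beq_decide (a b : Char) : (a == b) = decide (b = a) := by
  by_cases h : a = b
  · subst h; simp
  · simp [h, Ne.symm h]

theorem chkB_possible : ∀ (j lo hi : Nat) (s : List Char), 1 ≤ j → hi - lo = 2 ^ j - 1 →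
    lo < hi → hi ≤ s.length →
    (chkB s lo hi).1 = ((s.drop lo).take (hi - lo)).contains '1' ∧
    (chkB s lo hi).2 = !possibleA ((s.drop lo).take (hi - lo)) := by
  intro j
  induction j with
  | zero => intro lo hi s hj; omega
  | succ j ih =>
    intro lo hi s _ hsz hlt hle
    by_cases hj0 : j = 0
    · -- size-1 base segment
      subst hj0
      have h1 : hi - lo = 1 := by simpa using hsz
      have hlo : lo < s.length := by omega
      rw [chkB, dif_pos (by omega)]
      rw [h1, List.drop_eq_getElem_cons hlo, List.take_succ_cons, List.take_zero]
      have hp : possibleA [s[lo]] = true := by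
        rw [possibleA, dif_pos (Or.inl (by simp))]
      rw [hp, List.getElem?_eq_getElem hlo]
      refine ⟨?_, by simp⟩
      show (some s[lo] == some '1') = _
      simp only [Option.some_beq_some]
      simp [char_beq_decide]
    · -- internal node
      have hj1 : 1 ≤ j := by omega
      have hP2 : 2 ≤ 2 ^ j := by
        calc 2 = 2 ^ 1 := by norm_num
        _ ≤ 2 ^ j := Nat.pow_le_pow_right (by norm_num) hj1
      have hpow : 2 ^ (j + 1) = 2 * 2 ^ j := by ring
      have hsz' : hi - lo = 2 * 2 ^ j - 1 := by omega
      have hmid : (lo + hi) / 2 = lo + (2 ^ j - 1) := by omega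
      -- IHs for the two halves
      obtain ⟨hl1, hl2⟩ := ih lo (lo + (2 ^ j - 1)) s hj1 (by omega) (by omega) (by omega)
      obtain ⟨hr1, hr2⟩ := ih (lo + 2 ^ j) hi s hj1 (by omega) (by omega) (by omega)
      have e1 : lo + (2 ^ j - 1) - lo = 2 ^ j - 1 := by omega
      have e2 : hi - (lo + 2 ^ j) = 2 ^ j - 1 := by omega
      rw [e1] at hl1 hl2
      rw [e2] at hr1 hr2
      -- segment abbreviations
      set tl := (s.drop lo).take (2 ^ j - 1) with htl
      set tr := (s.drop (lo + 2 ^ j)).take (2 ^ j - 1) with htr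
      set t := (s.drop lo).take (2 * 2 ^ j - 1) with ht
      have hlen_dl : (s.drop lo).length = s.length - lo := by simp
      have htlen : t.length = 2 * 2 ^ j - 1 := by
        rw [ht, List.length_take]; omega
      have hmidc : lo + (2 ^ j - 1) < s.length := by omega
      set c := s[lo + (2 ^ j - 1)] with hc
      have hcg : s[lo + (2 ^ j - 1)]? = some c := List.getElem?_eq_getElem hmidc
      have hidx : t[2 ^ j - 1]? = some c := by
        rw [ht, List.getElem?_take, if_pos (by omega), List.getElem?_drop]
        exact hcg
      have hidxg : 2 ^ j - 1 < t.length := by omega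
      have hidx' : t[2 ^ j - 1] = c := by
        have h := List.getElem?_eq_getElem hidxg
        rw [hidx] at h
        exact (Option.some_inj.mp h).symm
      have htake : t.take (2 ^ j - 1) = tl := by
        have e : min (2 ^ j - 1) (2 * 2 ^ j - 1) = 2 ^ j - 1 := by omega
        rw [ht, htl, List.take_take, e]
      have hdropP : t.drop (2 ^ j - 1 + 1) = tr := by
        have e : 2 * 2 ^ j - 1 - (2 ^ j - 1 + 1) = 2 ^ j - 1 := by omega
        have e' : lo + (2 ^ j - 1 + 1) = lo + 2 ^ j := by omega
        rw [ht, htr, List.drop_take, List.drop_drop, e, e']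
      have hsplit : t = tl ++ c :: tr := by
        rw [← htake, ← hdropP, ← hidx']
        rw [← List.drop_eq_getElem_cons hidxg, List.take_append_drop]
      -- unfold chkB once
      rw [chkB, dif_neg (by omega)]
      have harg : lo + (2 ^ j - 1) + 1 = lo + 2 ^ j := by omega
      simp only [hmid, harg, hsz']
      rw [hl1, hr1, hl2, hr2, hcg, ← ht]
      have hfst : (tl.contains '1' || tr.contains '1' || (some c == some '1')) = t.contains '1' := by
        rw [hsplit]
        simp [char_beq_decide, Bool.or_comm, Bool.or_assoc, Bool.or_left_comm]
      refine ⟨hfst, ?_⟩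
      -- second components
      conv_rhs => rw [possibleA]
      by_cases hbase : (t.length = 1 ∨ t.contains '1' = false ∨ t.contains '0' = false)
      · rw [dif_pos hbase]
        rcases hbase with hb | hb | hb
        · omega
        · -- no '1' anywhere in the segment
          rw [hsplit] at hb
          simp at hb
          obtain ⟨hb1, hb2, hb3⟩ := hb
          have pl : possibleA tl = true := possibleA_of_no1 tl (by simp [hb1])
          have pr : possibleA tr = true := possibleA_of_no1 tr (by simp [hb3])
          simp [pl, pr, hb1, hb3]
        · -- no '0' anywhere in the segment
          rw [hsplit] at hb
          simp at hb
          obtain ⟨hb1, hb2, hb3⟩ := hb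
          have pl : possibleA tl = true := possibleA_of_no0 tl (by simp [hb1])
          have pr : possibleA tr = true := possibleA_of_no0 tr (by simp [hb3])
          simp [pl, pr, Ne.symm hb2]
      · rw [dif_neg hbase]
        push_neg at hbase
        obtain ⟨hlen1, h1t, h0t⟩ := hbase
        rw [Ne, Bool.not_eq_false] at h1t h0t
        have hm2 : t.length / 2 = 2 ^ j - 1 := by omega
        simp only [hm2, hidx, htake, hdropP]
        by_cases hc0 : c = '0'
        · rw [if_pos (by rw [hc0])]
          have hor : '1' ∈ tl ∨ '1' ∈ tr := by
            rw [hsplit] at h1t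
            simp [hc0] at h1t
            tauto
          simp [hc0]
          tauto
        · rw [if_neg (by simp [hc0])]
          simp [hc0, Bool.not_and]

theorem elem_eq (n : Int) (h1 : -2147483648 ≤ n) (h2 : n ≤ 2147483648) :
    elemA (pyBin2 n) = elemB n := by
  obtain ⟨hge1, hle33⟩ := pyBin2_len n h1 h2
  unfold elemA elemB
  simp only [find_eq_padSize (pyBin2 n).length hge1 hle33]
  obtain ⟨j, hj, hpowp, hgeL⟩ := padSize_form (pyBin2 n).length
  have hcast : (((padSize (pyBin2 n).length 1 : Nat) : Int) - ((pyBin2 n).length : Int)).toNat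
      = padSize (pyBin2 n).length 1 - (pyBin2 n).length := by omega
  rw [hcast]
  set s := List.replicate (padSize (pyBin2 n).length 1 - (pyBin2 n).length) '0' ++ pyBin2 n with hs
  have hslen : s.length = padSize (pyBin2 n).length 1 := by
    rw [hs]; simp [List.length_replicate]; omega
  have hj1 : 1 ≤ 2 ^ j := Nat.one_le_two_pow
  obtain ⟨_, h2c⟩ := chkB_possible j 0 s.length s hj (by omega) (by omega) (by omega)
  have hseg : (s.drop 0).take (s.length - 0) = s := by simp
  rw [hseg] at h2c
  rw [h2c]
  cases possibleA s <;> simp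

theorem solutionA_eq (numbers : List Int) :
    solution numbers = (numbers.map (fun number => pyBin2 number)).map elemA := by
  have h := foldl_snoc elemA
      (fun (answer : List Int) (number : List Char) =>
        let length := number.length
        let number :=
          match ((PySem.List.pyRange 0 50 1).map (fun x => (2:Int) ^ x.toNat - 1)).find?
              (fun bin_num => (length : Int) ≤ bin_num) with
          | some bin_num => List.replicate (bin_num - (length : Int)).toNat '0' ++ number
          | none => number
        answer ++ [if possibleA number then (1:Int) else 0])
      (fun a x => rfl) (numbers.map (fun number => pyBin2 number)) []
  rw [List.nil_append] at h
  exact h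

theorem solutionB_eq (numbers : List Int) :
    solution_alt numbers = numbers.map elemB := by
  have h := foldl_snoc elemB
      (fun (answer : List Int) (n : Int) =>
        let s0 := pyBin2 n
        let size := padSize s0.length 1
        let s := List.replicate (size - s0.length) '0' ++ s0
        answer ++ [if (chkB s 0 s.length).2 then (0:Int) else 1])
      (fun a x => rfl) numbers []
  rw [List.nil_append] at h
  exact h

theorem solution_spec : Claim_equal_solution := by
  intro numbers hdom
  unfold Spec_solution
  rw [solutionA_eq, solutionB_eq, List.map_map]
  apply List.map_congr_left
  intro n hn
  have hb : pvDomInt n = true := by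
    rw [Dom_solution, List.all_eq_true] at hdom
    exact hdom n hn
  rw [pvDomInt, decide_eq_true_eq] at hb
  exact elem_eq n hb.1 hb.2
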